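-- pv_equiv track=rewrite | github.com/stefania-bajdu/crazyflie-control | ros_ws/src/crazyflie_control/crazyflie_control/control_packagecf.py | get_cluster_mappings
-- ===== SOURCE A (Python) =====
-- def get_cluster_mappings(latest_alloc, drone_bodies):
--     cluster_to_drones = {}
--     drone_to_cluster_idx = {}
--
--     # Build a cluster -> drones map {'target' : [list of drone names]}
--     for i, cluster_id in enumerate(latest_alloc):
--         drone = drone_bodies[i]
--         if cluster_id not in cluster_to_drones:
--             cluster_to_drones[cluster_id] = []
--         cluster_to_drones[cluster_id].append(drone)
--
--     # Build a drone -> (cluster_id, index_in_cluster) map {'drone name' : (assigned target, index in the targets cluster)}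
--     for cluster_id in cluster_to_drones:
--         for idx, drone in enumerate(cluster_to_drones[cluster_id]):
--             drone_to_cluster_idx[drone] = (cluster_id, idx)
--
--     return cluster_to_drones, drone_to_cluster_idx
-- ===== SOURCE B (Python) =====
-- def get_cluster_mappings(latest_alloc, drone_bodies):
--     pairs = [(c, drone_bodies[i]) for i, c in enumerate(latest_alloc)]
--     cluster_ids = list(dict.fromkeys(latest_alloc))
--     cluster_to_drones = {c: [n for x, n in pairs if x == c] for c in cluster_ids}
--     drone_to_cluster_idx = dict(
--         (n, (c, j)) for c, ds in cluster_to_drones.items() for j, n in enumerate(ds)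
--     )
--     return cluster_to_drones, drone_to_cluster_idx
-- ===== Notes on version B (the rewrite author's own statement) =====
-- stated objective: alternative
-- what changed: B replaces A's incremental dict-mutation grouping (append to a per-key list while scanning) by a declarative group-by: pair each cluster id with its drone, dedup the cluster ids once, build each cluster's drone list by filtering the pair list, and derive the index map by one flat dict comprehension over the grouped items.
import Mathlib
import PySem

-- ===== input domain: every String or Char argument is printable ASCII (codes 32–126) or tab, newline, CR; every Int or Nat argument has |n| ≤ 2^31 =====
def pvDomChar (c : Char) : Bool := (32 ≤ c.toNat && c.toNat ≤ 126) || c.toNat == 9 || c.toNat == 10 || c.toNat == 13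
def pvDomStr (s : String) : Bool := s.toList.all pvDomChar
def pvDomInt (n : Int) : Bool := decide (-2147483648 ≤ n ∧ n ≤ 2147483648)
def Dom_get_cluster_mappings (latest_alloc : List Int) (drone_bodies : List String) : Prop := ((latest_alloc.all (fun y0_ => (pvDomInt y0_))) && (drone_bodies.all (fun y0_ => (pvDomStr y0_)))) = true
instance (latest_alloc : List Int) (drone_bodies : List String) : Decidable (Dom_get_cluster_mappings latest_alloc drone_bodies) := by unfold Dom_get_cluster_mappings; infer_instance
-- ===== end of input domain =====

-- B replaces A's incremental dict-mutation grouping by a declarative group-by (pair ids with drones,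
-- dedup ids, filter per cluster, one flat comprehension for the index map); equal wherever A returns.

-- ===== PORT A =====
-- literal transliteration of A: two passes, a mutated dict per pass
def get_cluster_mappings (latest_alloc : List Int) (drone_bodies : List String) :
    (List (Int × List String)) × (List (String × Int × Int)) :=
  let cluster_to_drones : PySem.Dict Int (List String) :=
    (PySem.List.enumerate latest_alloc).foldl (fun d p =>
      let drone := (PySem.List.pyGet? drone_bodies p.1).getD ""   -- in range on Pre_
      let d1 := if d.contains p.2 then d else d.insert p.2 []
      d1.insert p.2 (d1.getD p.2 [] ++ [drone])) PySem.Dict.empty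
  let drone_to_cluster_idx : PySem.Dict String (Int × Int) :=
    cluster_to_drones.items.foldl (fun m q =>
      (PySem.List.enumerate q.2).foldl (fun m r => m.insert r.2 (q.1, r.1)) m) PySem.Dict.empty
  (cluster_to_drones.items, drone_to_cluster_idx.items)

-- ===== PORT B =====
def get_cluster_mappings_alt (latest_alloc : List Int) (drone_bodies : List String) :
    (List (Int × List String)) × (List (String × Int × Int)) :=
  let pairs : List (Int × String) :=
    (PySem.List.enumerate latest_alloc).map
      (fun p => (p.2, (PySem.List.pyGet? drone_bodies p.1).getD ""))   -- in range on Pre_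
  let cluster_ids := PySem.List.dedup latest_alloc
  let cluster_to_drones : List (Int × List String) :=
    cluster_ids.map (fun c => (c, (pairs.filter (fun p => p.1 == c)).map (·.2)))
  let drone_to_cluster_idx : PySem.Dict String (Int × Int) :=
    PySem.Dict.ofList (cluster_to_drones.flatMap (fun q =>
      (PySem.List.enumerate q.2).map (fun r => (r.2, (q.1, r.1)))))
  (cluster_to_drones, drone_to_cluster_idx.items)

-- ===== PRECONDITION & SPEC =====
-- Pre_ excludes exactly the inputs where A raises IndexError (drone_bodies shorter than
-- latest_alloc); B raises the same IndexError there.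
def Pre_get_cluster_mappings (latest_alloc : List Int) (drone_bodies : List String) : Prop :=
  latest_alloc.length ≤ drone_bodies.length
instance (latest_alloc : List Int) (drone_bodies : List String) : Decidable (Pre_get_cluster_mappings latest_alloc drone_bodies) := by unfold Pre_get_cluster_mappings; infer_instance
def pvWitness_get_cluster_mappings : List Int × List String := ([1, 2, 1], ["a", "b", "c"])

def Spec_get_cluster_mappings (latest_alloc : List Int) (drone_bodies : List String) (out : (List (Int × List String)) × (List (String × Int × Int))) : Prop := out = get_cluster_mappings_alt latest_alloc drone_bodies
instance (latest_alloc : List Int) (drone_bodies : List String) (out : (List (Int × List String)) × (List (String × Int × Int))) : Decidable (Spec_get_cluster_mappings latest_alloc drone_bodies out) := by unfold Spec_get_cluster_mappings; infer_instance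

-- ===== CLAIM (what is proved, stated in full; the proofs are below) =====
def Claim_equal_get_cluster_mappings : Prop := ∀ (latest_alloc : List Int) (drone_bodies : List String), Dom_get_cluster_mappings latest_alloc drone_bodies → Pre_get_cluster_mappings latest_alloc drone_bodies → Spec_get_cluster_mappings latest_alloc drone_bodies (get_cluster_mappings latest_alloc drone_bodies)

-- ===== LEMMAS AND PROOFS =====

-- A's per-element dict update (ensure-key-then-append) is Python's d.modify in one step
lemma stepA_eq_modify (d : PySem.Dict Int (List String)) (c : Int) (n : String) :
    (let d1 := if d.contains c then d else d.insert c []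
     d1.insert c (d1.getD c [] ++ [n])) = d.modify c [] (· ++ [n]) := by
  by_cases h : d.contains c
  · simp only [h, if_true]
    rfl
  · simp only [h, Bool.false_eq_true, if_false, PySem.Dict.getD_insert_self,
      PySem.Dict.insert_insert_self, List.nil_append]
    show _ = d.insert c (d.getD c [] ++ [n])
    rw [PySem.Dict.getD_of_not_contains d [] (by simpa using h), List.nil_append]

-- the abstract grouping loop over (cluster, drone) pairs
def pvGroup (ps : List (Int × String)) : PySem.Dict Int (List String) :=
  ps.foldl (fun d p => d.modify p.1 [] (· ++ [p.2])) PySem.Dict.empty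

-- its items are exactly B's declarative group-by
lemma items_pvGroup (ps : List (Int × String)) :
    (pvGroup ps).items
      = (PySem.List.dedup (ps.map Prod.fst)).map
          (fun c => (c, (ps.filter (fun p => p.1 == c)).map (·.2))) := by
  have hnd : (pvGroup ps).keys.Nodup := by
    have := PySem.Dict.nodup_keys_foldl_modify_key ps Prod.fst [] (fun _ p l => l ++ [p.2])
      PySem.Dict.empty (by simp [PySem.Dict.keys_empty])
    simpa [pvGroup] using this
  have hkeys : (pvGroup ps).keys = PySem.Set.ofList (ps.map Prod.fst) := by
    have := PySem.Dict.keys_foldl_modify_key ps Prod.fst [] (fun _ p l => l ++ [p.2])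
      PySem.Dict.empty
    simpa [pvGroup, PySem.Dict.keys_empty, PySem.Set.update] using this
  have hget : ∀ c, (pvGroup ps).getD c [] = (ps.filter (fun p => p.1 == c)).map (·.2) := by
    intro c
    have := PySem.Dict.getD_foldl_modify_append (l := ps) (d := PySem.Dict.empty) (c := c)
    simpa [pvGroup, PySem.Dict.getD_empty] using this
  rw [PySem.Dict.items_eq_map_keys (pvGroup ps) hnd [], hkeys]
  simp only [PySem.List.dedup_eq_ofList]
  exact List.map_congr_left (fun c _ => by rw [hget c])

-- the (cluster, drone) pairs both programs scan are zip(latest_alloc, drone_bodies[:len])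
lemma pairs_eq_zip (latest_alloc : List Int) (drone_bodies : List String)
    (h : latest_alloc.length ≤ drone_bodies.length) :
    (PySem.List.enumerate latest_alloc).map
        (fun p => (p.2, (PySem.List.pyGet? drone_bodies p.1).getD ""))
      = latest_alloc.zip (drone_bodies.take latest_alloc.length) := by
  apply List.ext_getElem
  · simp [PySem.List.length_enumerate, h]
  · intro i h1 h2
    have hi : i < latest_alloc.length := by
      simpa [PySem.List.length_enumerate] using h1
    have hib : i < drone_bodies.length := lt_of_lt_of_le hi h
    simp [PySem.List.getElem_enumerate, hib]

-- A's nested second pass is a single fold over the flattened (drone, (cluster, idx)) pairs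
lemma nested_foldl_eq_flat (l : List (Int × List String)) (m : PySem.Dict String (Int × Int)) :
    l.foldl (fun m q =>
        (PySem.List.enumerate q.2).foldl (fun m r => m.insert r.2 (q.1, r.1)) m) m
      = (l.flatMap (fun q =>
          (PySem.List.enumerate q.2).map (fun r => (r.2, (q.1, r.1))))).foldl
          (fun m pr => m.insert pr.1 pr.2) m := by
  induction l generalizing m with
  | nil => rfl
  | cons q t ih => simp [List.flatMap_cons, List.foldl_append, List.foldl_map, ih]

-- ===== VERDICT (by name: the statement is the Claim_ definition above) =====
theorem get_cluster_mappings_spec : Claim_equal_get_cluster_mappings := by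
  intro latest_alloc drone_bodies _ hpre
  unfold Spec_get_cluster_mappings
  unfold Pre_get_cluster_mappings at hpre
  unfold get_cluster_mappings get_cluster_mappings_alt
  have hA : (PySem.List.enumerate latest_alloc).foldl (fun d p =>
      let drone := (PySem.List.pyGet? drone_bodies p.1).getD ""
      let d1 := if d.contains p.2 then d else d.insert p.2 []
      d1.insert p.2 (d1.getD p.2 [] ++ [drone])) PySem.Dict.empty
      = pvGroup ((PySem.List.enumerate latest_alloc).map
          (fun p => (p.2, (PySem.List.pyGet? drone_bodies p.1).getD ""))) := by
    unfold pvGroup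
    rw [List.foldl_map]
    exact PySem.List.foldl_congr_mem _ _ _ _ (fun d p _ =>
      stepA_eq_modify d p.2 ((PySem.List.pyGet? drone_bodies p.1).getD ""))
  have hfst : ((PySem.List.enumerate latest_alloc).map
      (fun p => (p.2, (PySem.List.pyGet? drone_bodies p.1).getD ""))).map Prod.fst
      = latest_alloc := by
    rw [pairs_eq_zip latest_alloc drone_bodies hpre]
    exact List.map_fst_zip (by simp [hpre])
  have hitems := items_pvGroup ((PySem.List.enumerate latest_alloc).map
      (fun p => (p.2, (PySem.List.pyGet? drone_bodies p.1).getD "")))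
  rw [hfst] at hitems
  simp only [hA, hitems, nested_foldl_eq_flat]
  rfl
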